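-- pv_equiv track=rewrite | github.com/cheng-wei-huang0612/Mersenne_Inversion | src/python/genlib.py | divstepx20
-- ===== SOURCE A (Python) =====
-- def divstepx20(FUV, GRS, delta, m1, ff):
--     asm_script = ""
--     # asm_script += f".rept 20\n"
--     for i in range(20):
--         asm_script += f"sub {m1}, {delta}, #1\n"
--         asm_script += f"tst {GRS}, #1\n"
--         asm_script += f"csel {ff}, {FUV}, xzr, ne\n"
--         asm_script += f"tst {m1}, {GRS}, ror #1\n"
--         asm_script += f"csneg {delta}, {m1}, {delta}, pl\n"
--         asm_script += f"csel {FUV}, {GRS}, {FUV}, mi\n"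
--         asm_script += f"csneg {ff}, {ff}, {ff}, pl\n"
--         asm_script += f"add {GRS}, {GRS}, {ff}\n"
--         asm_script += f"asr {GRS}, {GRS}, #1\n"
--     # asm_script += f".endr\n"
--     return asm_script
-- ===== SOURCE B (Python) =====
-- def divstepx20(FUV, GRS, delta, m1, ff):
--     insns = [
--         ("sub",   [m1, delta, "#1"]),
--         ("tst",   [GRS, "#1"]),
--         ("csel",  [ff, FUV, "xzr", "ne"]),
--         ("tst",   [m1, GRS, "ror #1"]),
--         ("csneg", [delta, m1, delta, "pl"]),
--         ("csel",  [FUV, GRS, FUV, "mi"]),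
--         ("csneg", [ff, ff, ff, "pl"]),
--         ("add",   [GRS, GRS, ff]),
--         ("asr",   [GRS, GRS, "#1"]),
--     ]
--     block = "".join(op + " " + ", ".join(args) + "\n" for op, args in insns)
--     return "".join([block] * 20)
-- ===== Notes on version B (the rewrite author's own statement) =====
-- stated objective: simpler
-- what changed: B replaces A's 20-iteration loop of nine incremental += f-string concatenations by a data-driven instruction table (mnemonic plus operand list), formats it in one join pass into the loop-invariant nine-line block, and repeats that block 20 times with one join.
import Mathlib
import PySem

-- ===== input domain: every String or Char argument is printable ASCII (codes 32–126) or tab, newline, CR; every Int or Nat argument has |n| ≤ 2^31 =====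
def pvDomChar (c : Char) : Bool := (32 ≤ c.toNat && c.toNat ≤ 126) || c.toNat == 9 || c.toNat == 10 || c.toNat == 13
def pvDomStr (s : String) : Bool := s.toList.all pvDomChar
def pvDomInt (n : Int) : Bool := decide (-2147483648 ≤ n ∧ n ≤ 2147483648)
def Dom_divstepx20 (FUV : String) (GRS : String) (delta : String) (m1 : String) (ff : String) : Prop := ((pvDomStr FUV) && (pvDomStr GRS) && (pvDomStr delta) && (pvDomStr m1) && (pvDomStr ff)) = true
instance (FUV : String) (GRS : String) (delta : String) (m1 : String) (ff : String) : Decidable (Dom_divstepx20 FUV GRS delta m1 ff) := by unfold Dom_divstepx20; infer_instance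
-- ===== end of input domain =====

-- B replaces A's 20-iteration loop of nine += concatenations by a data-driven instruction
-- table (mnemonic + operand list), one join-based formatting pass and one repetition; objective: simpler.

-- ===== PORT A =====
def divstepx20 (FUV : String) (GRS : String) (delta : String) (m1 : String) (ff : String) : String :=
  -- asm_script = ""; for i in range(20): asm_script += <nine f-string lines>; return asm_script
  (PySem.List.pyRange 0 20 1).foldl (fun asm_script _ =>
    let asm_script := asm_script ++ ("sub " ++ m1 ++ ", " ++ delta ++ ", #1\n")
    let asm_script := asm_script ++ ("tst " ++ GRS ++ ", #1\n")
    let asm_script := asm_script ++ ("csel " ++ ff ++ ", " ++ FUV ++ ", xzr, ne\n")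
    let asm_script := asm_script ++ ("tst " ++ m1 ++ ", " ++ GRS ++ ", ror #1\n")
    let asm_script := asm_script ++ ("csneg " ++ delta ++ ", " ++ m1 ++ ", " ++ delta ++ ", pl\n")
    let asm_script := asm_script ++ ("csel " ++ FUV ++ ", " ++ GRS ++ ", " ++ FUV ++ ", mi\n")
    let asm_script := asm_script ++ ("csneg " ++ ff ++ ", " ++ ff ++ ", " ++ ff ++ ", pl\n")
    let asm_script := asm_script ++ ("add " ++ GRS ++ ", " ++ GRS ++ ", " ++ ff ++ "\n")
    let asm_script := asm_script ++ ("asr " ++ GRS ++ ", " ++ GRS ++ ", #1\n")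
    asm_script) ""

-- ===== PORT B =====
def divstepx20_alt (FUV : String) (GRS : String) (delta : String) (m1 : String) (ff : String) : String :=
  let insns : List (String × List String) :=
    [("sub",   [m1, delta, "#1"]),
     ("tst",   [GRS, "#1"]),
     ("csel",  [ff, FUV, "xzr", "ne"]),
     ("tst",   [m1, GRS, "ror #1"]),
     ("csneg", [delta, m1, delta, "pl"]),
     ("csel",  [FUV, GRS, FUV, "mi"]),
     ("csneg", [ff, ff, ff, "pl"]),
     ("add",   [GRS, GRS, ff]),
     ("asr",   [GRS, GRS, "#1"])]
  let block := PySem.Str.join "" (insns.map (fun p => p.1 ++ " " ++ PySem.Str.join ", " p.2 ++ "\n"))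
  PySem.Str.join "" (PySem.List.pyRepeat [block] 20)

-- ===== PRECONDITION & SPEC =====
def Spec_divstepx20 (FUV : String) (GRS : String) (delta : String) (m1 : String) (ff : String) (out : String) : Prop := out = divstepx20_alt FUV GRS delta m1 ff
instance (FUV : String) (GRS : String) (delta : String) (m1 : String) (ff : String) (out : String) : Decidable (Spec_divstepx20 FUV GRS delta m1 ff out) := by unfold Spec_divstepx20; infer_instance

-- ===== CLAIM (what is proved, stated in full; the proofs are below) =====
def Claim_equal_divstepx20 : Prop := ∀ (FUV : String) (GRS : String) (delta : String) (m1 : String) (ff : String), Dom_divstepx20 FUV GRS delta m1 ff → Spec_divstepx20 FUV GRS delta m1 ff (divstepx20 FUV GRS delta m1 ff)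

-- ===== LEMMAS AND PROOFS =====

-- a constant-body foldl appending s is acc ++ ("".join of l.length copies of s)
theorem foldl_const_append {a : Type} (s : String) :
    ∀ (l : List a) (acc : String),
      l.foldl (fun r _ => r ++ s) acc = acc ++ PySem.Str.join "" (List.replicate l.length s) := by
  intro l
  induction l with
  | nil =>
      intro acc
      simp [PySem.Str.join, PySem.Chars.join, List.intercalate]
  | cons x xs ih =>
      intro acc
      simp only [List.foldl_cons, List.length_cons, ih]
      have h : PySem.Str.join "" (List.replicate (xs.length + 1) s)
          = s ++ PySem.Str.join "" (List.replicate xs.length s) := by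
        cases xs with
        | nil =>
            simp [PySem.Str.join, PySem.Chars.join, List.intercalate]
        | cons y ys =>
            simp [PySem.Str.join, List.replicate_succ, PySem.Chars.join_cons_cons]
      rw [h, String.append_assoc]

-- B's block equals the nine-line string one iteration of A appends
theorem block_eq (FUV GRS delta m1 ff : String) :
    PySem.Str.join "" (([("sub", [m1, delta, "#1"]),
     ("tst",   [GRS, "#1"]),
     ("csel",  [ff, FUV, "xzr", "ne"]),
     ("tst",   [m1, GRS, "ror #1"]),
     ("csneg", [delta, m1, delta, "pl"]),
     ("csel",  [FUV, GRS, FUV, "mi"]),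
     ("csneg", [ff, ff, ff, "pl"]),
     ("add",   [GRS, GRS, ff]),
     ("asr",   [GRS, GRS, "#1"])] : List (String × List String)).map
        (fun p => p.1 ++ " " ++ PySem.Str.join ", " p.2 ++ "\n"))
    = ("sub " ++ m1 ++ ", " ++ delta ++ ", #1\n") ++
      ("tst " ++ GRS ++ ", #1\n") ++
      ("csel " ++ ff ++ ", " ++ FUV ++ ", xzr, ne\n") ++
      ("tst " ++ m1 ++ ", " ++ GRS ++ ", ror #1\n") ++
      ("csneg " ++ delta ++ ", " ++ m1 ++ ", " ++ delta ++ ", pl\n") ++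
      ("csel " ++ FUV ++ ", " ++ GRS ++ ", " ++ FUV ++ ", mi\n") ++
      ("csneg " ++ ff ++ ", " ++ ff ++ ", " ++ ff ++ ", pl\n") ++
      ("add " ++ GRS ++ ", " ++ GRS ++ ", " ++ ff ++ "\n") ++
      ("asr " ++ GRS ++ ", " ++ GRS ++ ", #1\n") := by
  simp [PySem.Str.join, PySem.Chars.join_cons_cons, PySem.Chars.join_singleton]
  ext : 1
  simp [String.append_assoc]

-- B's let/join/pyRepeat expression, zeta- and repeat-normalised
theorem alt_eq (FUV GRS delta m1 ff : String) :
    divstepx20_alt FUV GRS delta m1 ff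
    = PySem.Str.join "" (List.replicate 20
        (PySem.Str.join "" (([("sub", [m1, delta, "#1"]),
          ("tst",   [GRS, "#1"]),
          ("csel",  [ff, FUV, "xzr", "ne"]),
          ("tst",   [m1, GRS, "ror #1"]),
          ("csneg", [delta, m1, delta, "pl"]),
          ("csel",  [FUV, GRS, FUV, "mi"]),
          ("csneg", [ff, ff, ff, "pl"]),
          ("add",   [GRS, GRS, ff]),
          ("asr",   [GRS, GRS, "#1"])] : List (String × List String)).map
            (fun p => p.1 ++ " " ++ PySem.Str.join ", " p.2 ++ "\n")))) := by
  show PySem.Str.join "" (PySem.List.pyRepeat [_] 20) = _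
  rw [PySem.List.pyRepeat_singleton]
  rfl

-- ===== VERDICT (by name: the statement is the Claim_ definition above) =====
theorem divstepx20_spec : Claim_equal_divstepx20 := by
  intro FUV GRS delta m1 ff _
  unfold Spec_divstepx20 divstepx20
  rw [alt_eq]
  rw [show (fun (asm_script : String) (_ : Int) =>
        let asm_script := asm_script ++ ("sub " ++ m1 ++ ", " ++ delta ++ ", #1\n")
        let asm_script := asm_script ++ ("tst " ++ GRS ++ ", #1\n")
        let asm_script := asm_script ++ ("csel " ++ ff ++ ", " ++ FUV ++ ", xzr, ne\n")
        let asm_script := asm_script ++ ("tst " ++ m1 ++ ", " ++ GRS ++ ", ror #1\n")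
        let asm_script := asm_script ++ ("csneg " ++ delta ++ ", " ++ m1 ++ ", " ++ delta ++ ", pl\n")
        let asm_script := asm_script ++ ("csel " ++ FUV ++ ", " ++ GRS ++ ", " ++ FUV ++ ", mi\n")
        let asm_script := asm_script ++ ("csneg " ++ ff ++ ", " ++ ff ++ ", " ++ ff ++ ", pl\n")
        let asm_script := asm_script ++ ("add " ++ GRS ++ ", " ++ GRS ++ ", " ++ ff ++ "\n")
        let asm_script := asm_script ++ ("asr " ++ GRS ++ ", " ++ GRS ++ ", #1\n")
        asm_script)
      = (fun (r : String) (_ : Int) => r ++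
        (("sub " ++ m1 ++ ", " ++ delta ++ ", #1\n") ++
         ("tst " ++ GRS ++ ", #1\n") ++
         ("csel " ++ ff ++ ", " ++ FUV ++ ", xzr, ne\n") ++
         ("tst " ++ m1 ++ ", " ++ GRS ++ ", ror #1\n") ++
         ("csneg " ++ delta ++ ", " ++ m1 ++ ", " ++ delta ++ ", pl\n") ++
         ("csel " ++ FUV ++ ", " ++ GRS ++ ", " ++ FUV ++ ", mi\n") ++
         ("csneg " ++ ff ++ ", " ++ ff ++ ", " ++ ff ++ ", pl\n") ++
         ("add " ++ GRS ++ ", " ++ GRS ++ ", " ++ ff ++ "\n") ++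
         ("asr " ++ GRS ++ ", " ++ GRS ++ ", #1\n"))) from by
      funext r i
      simp [String.append_assoc]]
  rw [foldl_const_append]
  rw [show ((PySem.List.pyRange 0 20 1).length) = 20 from by decide]
  rw [block_eq]
  simp
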